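-- pv_equiv track=rewrite | github.com/stupakdm/OCR | main/modify/Image_update/findBD/correct_word.py | clean_words
-- ===== SOURCE A (Python) =====
-- def clean_words(words):
--     j = 0
--     l = len(words)
--
--     while j < l:
--         if len(words[j]) != 0:
--             if len(words[j]) < 3 and not words[j][0].isdigit():
--                 if j + 1 != len(words):
--                     words[j] += words[j + 1]
--                     del words[j + 1]
--                     l = len(words)
--                 else:
--                     j += 1
--             else:
--                 j += 1
--         else:
--             del words[j]
--             l = len(words)
--     return words
-- ===== SOURCE B (Python) =====
-- def clean_words(words):
--     # One left-to-right pass over the original list, accumulating merges,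
--     # instead of A's repeated in-place del/shift. (Return value only; A
--     # mutates its argument in place, B does not.)
--     out = []
--     i = 0
--     n = len(words)
--     while i < n:
--         w = words[i]
--         i += 1
--         if not w:
--             continue
--         while len(w) < 3 and not w[0].isdigit() and i < n:
--             w += words[i]
--             i += 1
--         out.append(w)
--     return out
-- ===== Notes on version B (the rewrite author's own statement) =====
-- stated objective: faster
-- what changed: A repeatedly mutates the list in place (del shifts the tail on every empty word and every merge); B makes one left-to-right pass over the original list, skipping empty words and accumulating merges into a new output list.
import Mathlib
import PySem

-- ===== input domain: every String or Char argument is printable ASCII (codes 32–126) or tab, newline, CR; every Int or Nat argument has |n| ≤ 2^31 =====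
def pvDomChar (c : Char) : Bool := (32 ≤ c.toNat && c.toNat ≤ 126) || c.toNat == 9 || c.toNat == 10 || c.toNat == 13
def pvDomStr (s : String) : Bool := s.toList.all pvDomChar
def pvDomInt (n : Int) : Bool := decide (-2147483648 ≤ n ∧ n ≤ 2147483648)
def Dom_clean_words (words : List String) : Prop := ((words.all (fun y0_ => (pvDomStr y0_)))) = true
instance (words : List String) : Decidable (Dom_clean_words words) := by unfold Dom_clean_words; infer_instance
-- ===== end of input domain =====

-- B replaces A's quadratic in-place del/shift loop by a single left-to-right pass that
-- accumulates merges into an output list (return value only: Python A mutates its argument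
-- in place, B does not).

-- ===== PORT A =====
-- while loop of A: state is the (mutated) list `words` and the index `j`;
-- `l` is always `words.length` after each mutation, so it is not carried separately.
def clean_words_go (words : List String) (j : Nat) : List String :=
  if hj : j < words.length then
    if (words.getD j "").length ≠ 0 then
      if (words.getD j "").length < 3 ∧
          ¬ PySem.Chars.isdigit ((words.getD j "").toList.headD ' ') = true then
        if hne : j + 1 ≠ words.length then
          -- words[j] += words[j+1]; del words[j+1]
          clean_words_go
            ((words.set j ((words.getD j "") ++ (words.getD (j+1) ""))).eraseIdx (j+1)) j
        else
          clean_words_go words (j+1)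
      else
        clean_words_go words (j+1)
    else
      -- del words[j]
      clean_words_go (words.eraseIdx j) j
  else
    words
termination_by 2 * words.length - j
decreasing_by
  · have : j + 1 < words.length := by omega
    simp [List.length_eraseIdx, List.length_set, this]
    omega
  · omega
  · omega
  · simp [List.length_eraseIdx, hj]
    omega

def clean_words (words : List String) : List String :=
  clean_words_go words 0

-- ===== PORT B =====
mutual
-- inner while of B: current accumulated word `w`, remaining input `rest`
def clean_alt_merge (w : String) (rest : List String) : List String :=
  if w.length < 3 ∧ ¬ PySem.Chars.isdigit (w.toList.headD ' ') = true ∧ rest ≠ [] then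
    clean_alt_merge (w ++ rest.headD "") rest.tail
  else
    w :: clean_alt_outer rest
termination_by 2 * rest.length + 1
decreasing_by
  · rename_i h; cases rest with
    | nil => exact absurd rfl h.2.2
    | cons x t => simp only [List.tail_cons, List.length_cons]; omega
  · omega

-- outer while of B
def clean_alt_outer (words : List String) : List String :=
  match words with
  | [] => []
  | w :: rest => if w.length = 0 then clean_alt_outer rest else clean_alt_merge w rest
termination_by 2 * words.length
decreasing_by
  · simp only [List.length_cons]; omega
  · simp only [List.length_cons]; omega
end

def clean_words_alt (words : List String) : List String :=
  clean_alt_outer words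

-- ===== PRECONDITION & SPEC =====
def Spec_clean_words (words : List String) (out : List String) : Prop := out = clean_words_alt words
instance (words : List String) (out : List String) : Decidable (Spec_clean_words words out) := by unfold Spec_clean_words; infer_instance

-- ===== CLAIM (what is proved, stated in full; the proofs are below) =====
def Claim_equal_clean_words : Prop := ∀ (words : List String), Dom_clean_words words → Spec_clean_words words (clean_words words)

-- ===== LEMMAS AND PROOFS =====

lemma pv_eraseIdx_append (A B : List String) (k : Nat) :
    (A ++ B).eraseIdx (A.length + k) = A ++ B.eraseIdx k := by
  induction A with
  | nil => simp
  | cons a A ih => simpa [Nat.succ_add] using ih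

lemma pv_outer_nil : clean_alt_outer [] = [] := by
  rw [clean_alt_outer]

lemma pv_outer_zero (w : String) (t : List String) (hw : w.length = 0) :
    clean_alt_outer (w :: t) = clean_alt_outer t := by
  rw [clean_alt_outer]; simp [hw]

lemma pv_outer_nonempty (w : String) (t : List String) (hw : w.length ≠ 0) :
    clean_alt_outer (w :: t) = clean_alt_merge w t := by
  rw [clean_alt_outer]; simp [hw]

lemma pv_merge_step (w x : String) (t : List String)
    (hc : w.length < 3 ∧ ¬ PySem.Chars.isdigit (w.toList.headD ' ') = true) :
    clean_alt_merge w (x :: t) = clean_alt_merge (w ++ x) t := by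
  rw [clean_alt_merge.eq_def, if_pos ⟨hc.1, hc.2, List.cons_ne_nil x t⟩]
  simp only [List.headD_cons, List.tail_cons]

lemma pv_merge_stop (w : String) (t : List String)
    (hc : ¬ (w.length < 3 ∧ ¬ PySem.Chars.isdigit (w.toList.headD ' ') = true ∧ t ≠ [])) :
    clean_alt_merge w t = w :: clean_alt_outer t := by
  rw [clean_alt_merge.eq_def, if_neg hc]

-- the invariant: A's loop at index |A| over processed prefix A ++ remaining B equals A ++ B cleaned
lemma pv_go_eq (n : Nat) (A B : List String) (hn : B.length ≤ n) :
    clean_words_go (A ++ B) A.length = A ++ clean_alt_outer B := by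
  induction n generalizing A B with
  | zero =>
    have hB : B = [] := by cases B <;> simp_all
    subst hB
    rw [clean_words_go, pv_outer_nil]; simp
  | succ n ih =>
    cases B with
    | nil => rw [clean_words_go, pv_outer_nil]; simp
    | cons w t =>
      have hget : (A ++ w :: t).getD A.length "" = w := by simp
      have hlen : A.length < (A ++ w :: t).length := by simp
      by_cases hw : w.length = 0
      · -- del words[j]: the empty word disappears on both sides
        rw [clean_words_go, dif_pos hlen, hget, if_neg (by simp [hw])]
        have he : (A ++ w :: t).eraseIdx A.length = A ++ t := by
          simpa using pv_eraseIdx_append A (w :: t) 0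
        rw [he, ih A t (by simp at hn; omega), pv_outer_zero w t hw]
      · by_cases hc : w.length < 3 ∧ ¬ PySem.Chars.isdigit (w.toList.headD ' ') = true
        · cases t with
          | nil =>
            -- short word is last: j advances, both sides keep w
            rw [clean_words_go]
            simp only [hget, hlen, dif_pos, if_pos hw, if_pos hc]
            rw [dif_neg (by simp)]
            have h2 : A.length + 1 = (A ++ [w]).length := by simp
            rw [show clean_words_go (A ++ [w]) (A.length + 1)
                  = clean_words_go ((A ++ [w]) ++ []) (A ++ [w]).length by rw [h2]; simp]
            rw [ih (A ++ [w]) [] (by simp)]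
            rw [pv_outer_nonempty w [] hw, pv_merge_stop w [] (by simp), pv_outer_nil]
            simp
          | cons x t' =>
            -- merge w with the next word x on both sides
            rw [clean_words_go]
            have hne : A.length + 1 ≠ (A ++ w :: x :: t').length := by simp
            have hgx : (A ++ w :: x :: t').getD (A.length + 1) "" = x := by
              rw [List.getD_eq_getElem?_getD, List.getElem?_append_right (by omega)]
              simp [show A.length + 1 - A.length = 1 from by omega]
            simp only [hget, hgx, hlen, dif_pos, if_pos hw, if_pos hc, dif_pos hne]
            have hset : (A ++ w :: x :: t').set A.length (w ++ x) = A ++ (w ++ x) :: x :: t' := by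
              simp
            have herase : (A ++ (w ++ x) :: x :: t').eraseIdx (A.length + 1)
                = A ++ (w ++ x) :: t' := by
              simpa using pv_eraseIdx_append A ((w ++ x) :: x :: t') 1
            rw [hset, herase, ih A ((w ++ x) :: t') (by simp at hn ⊢; omega)]
            rw [pv_outer_nonempty w (x :: t') hw, pv_merge_step w x t' hc]
            rw [pv_outer_nonempty (w ++ x) t'
                  (by simp only [String.length_append]; omega)]
        · -- word qualifies (length ≥ 3 or starts with a digit): j advances
          rw [clean_words_go]
          simp only [hget, hlen, dif_pos, if_pos hw, if_neg hc]
          have h2 : A.length + 1 = (A ++ [w]).length := by simp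
          rw [show clean_words_go (A ++ w :: t) (A.length + 1)
                = clean_words_go ((A ++ [w]) ++ t) (A ++ [w]).length by rw [h2]; simp]
          rw [ih (A ++ [w]) t (by simp at hn ⊢; omega)]
          rw [pv_outer_nonempty w t hw,
              pv_merge_stop w t (by intro h; exact hc ⟨h.1, h.2.1⟩)]
          simp

-- ===== VERDICT (by name: the statement is the Claim_ definition above) =====
theorem clean_words_spec : Claim_equal_clean_words := by
  intro words _
  unfold Spec_clean_words clean_words clean_words_alt
  simpa using pv_go_eq words.length [] words (le_refl _)
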